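-- pv_equiv track=rewrite | github.com/Yohmike/advent_prep | 2024/22/22_star_2.py | generate_secret_sequences
-- ===== SOURCE A (Python) =====
-- def mix_prune(secret, value):
--     return (secret ^ value) % 16777216
--
-- def compute_secret(original):
--     mul_secret = original * 64
--     prune = mix_prune(mul_secret, original)
--     div_secret = prune // 32
--     prune = mix_prune(div_secret, prune)
--     mul_secret = prune * 2048
--     prune = mix_prune(mul_secret, prune)
--
--     return prune
--
-- def generate_secret_sequences(start, times=2000):
--     next = start
--
--     secrets = [start % 10]
--     price_sequences = {}
--
--     for i in range(times):
--         prev = secrets.pop()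
--         next = compute_secret(next)
--         last_digit = next % 10
--         secrets.append(last_digit - prev)
--         if i >= 3:
--             str_seq = ",".join([str(x) for x in secrets[i - 3 : i + 1]])
--             if price_sequences.get(str_seq) is None:
--                 price_sequences[str_seq] = last_digit
--         secrets.append(last_digit)
--
--     return price_sequences
-- ===== SOURCE B (Python) =====
-- def _mix(secret, value):
--     return (secret ^ value) % 16777216
--
-- def _step(s):
--     s = _mix(s * 64, s)
--     s = _mix(s // 32, s)
--     s = _mix(s * 2048, s)
--     return s
--
-- def generate_secret_sequences(start, times=2000):
--     # Precompute all prices, then derive deltas and scan 4-delta windows via zips.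
--     prices = [start % 10]
--     s = start
--     for _ in range(times):
--         s = _step(s)
--         prices.append(s % 10)
--     deltas = [b - a for a, b in zip(prices, prices[1:])]
--     res = {}
--     for (d0, d1, d2, d3), price in zip(
--         zip(deltas, deltas[1:], deltas[2:], deltas[3:]), prices[4:]
--     ):
--         key = f"{d0},{d1},{d2},{d3}"
--         if key not in res:
--             res[key] = price
--     return res
-- ===== Notes on version B (the rewrite author's own statement) =====
-- stated objective: simpler
-- what changed: B replaces A's single loop that pops/appends on a mixed deltas-and-price list and slices it each iteration by a flat pipeline: precompute the full price list, derive the delta list by zipping consecutive prices, then scan the 4-delta windows by zipping shifted lists, recording each window's price on first occurrence.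
import Mathlib
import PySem

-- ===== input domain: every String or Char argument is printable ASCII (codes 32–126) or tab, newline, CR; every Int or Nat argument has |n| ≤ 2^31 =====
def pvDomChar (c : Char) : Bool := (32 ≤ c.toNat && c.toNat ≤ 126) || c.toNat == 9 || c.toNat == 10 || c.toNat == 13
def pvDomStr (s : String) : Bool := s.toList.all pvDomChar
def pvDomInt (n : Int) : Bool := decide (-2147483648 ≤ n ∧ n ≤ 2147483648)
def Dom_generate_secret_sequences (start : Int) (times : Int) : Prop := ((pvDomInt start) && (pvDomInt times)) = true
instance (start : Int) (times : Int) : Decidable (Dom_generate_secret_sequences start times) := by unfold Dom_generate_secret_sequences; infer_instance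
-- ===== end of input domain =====

-- B precomputes the full price list, derives deltas, and scans 4-delta windows by zipping
-- shifted lists — a flat decomposition instead of A's single loop with pop/append/slice
-- on a mixed list (objective: simpler; return value only, no observable mutation).

-- ===== PORT A =====
def mix_prune (secret value : Int) : Int :=
  PySem.Int.mod (PySem.Int.bxor secret value) 16777216

def compute_secret (original : Int) : Int :=
  let mul_secret := original * 64
  let prune := mix_prune mul_secret original
  let div_secret := PySem.Int.floordiv prune 32
  let prune := mix_prune div_secret prune
  let mul_secret := prune * 2048
  let prune := mix_prune mul_secret prune
  prune

-- loop body of A's `for i in range(times)` (state: next, secrets, price_sequences)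
def gssStep (st : Int × List Int × PySem.Dict String Int) (i : Int) :
    Int × List Int × PySem.Dict String Int :=
  match PySem.List.pop? st.2.1 (-1) with
  | none => st   -- IndexError; unreachable: secrets is never empty
  | some (prev, secrets) =>
    let next := compute_secret st.1
    let last_digit := PySem.Int.mod next 10
    let secrets := secrets ++ [last_digit - prev]
    let ps :=
      if i ≥ 3 then
        let str_seq := PySem.Str.join ","
          ((PySem.List.slice secrets (some (i - 3)) (some (i + 1))).map PySem.Int.toStr)
        if (PySem.Dict.get? st.2.2 str_seq).isNone then
          PySem.Dict.insert st.2.2 str_seq last_digit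
        else st.2.2
      else st.2.2
    (next, secrets ++ [last_digit], ps)

def generate_secret_sequences (start : Int) (times : Int) : List (String × Int) :=
  (((PySem.List.pyRange 0 times 1).foldl gssStep
      (start, [PySem.Int.mod start 10], PySem.Dict.empty)).2.2).items

-- ===== PORT B =====
def mix_alt (secret value : Int) : Int :=
  PySem.Int.mod (PySem.Int.bxor secret value) 16777216

def step_alt (s : Int) : Int :=
  let s1 := mix_alt (s * 64) s
  let s2 := mix_alt (PySem.Int.floordiv s1 32) s1
  mix_alt (s2 * 2048) s2

-- body of B's window loop: record the window's price under its key if absent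
def insWin (res : PySem.Dict String Int) (wp : (Int × Int × Int × Int) × Int) :
    PySem.Dict String Int :=
  let key := PySem.Int.toStr wp.1.1 ++ "," ++ PySem.Int.toStr wp.1.2.1 ++ "," ++
             PySem.Int.toStr wp.1.2.2.1 ++ "," ++ PySem.Int.toStr wp.1.2.2.2
  if PySem.Dict.contains res key then res else PySem.Dict.insert res key wp.2

def generate_secret_sequences_alt (start : Int) (times : Int) : List (String × Int) :=
  let pr := (PySem.List.pyRange 0 times 1).foldl
      (fun (st : Int × List Int) _ =>
        let s := step_alt st.1
        (s, st.2 ++ [PySem.Int.mod s 10]))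
      (start, [PySem.Int.mod start 10])
  let prices := pr.2
  let deltas := (prices.zip (PySem.List.slice prices (some 1) none)).map (fun ab => ab.2 - ab.1)
  let windows := deltas.zip ((PySem.List.slice deltas (some 1) none).zip
      ((PySem.List.slice deltas (some 2) none).zip (PySem.List.slice deltas (some 3) none)))
  ((windows.zip (PySem.List.slice prices (some 4) none)).foldl insWin PySem.Dict.empty).items

-- ===== PRECONDITION & SPEC =====
def Spec_generate_secret_sequences (start : Int) (times : Int) (out : List (String × Int)) : Prop := out = generate_secret_sequences_alt start times
instance (start : Int) (times : Int) (out : List (String × Int)) : Decidable (Spec_generate_secret_sequences start times out) := by unfold Spec_generate_secret_sequences; infer_instance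

-- ===== CLAIM (what is proved, stated in full; the proofs are below) =====
def Claim_equal_generate_secret_sequences : Prop := ∀ (start : Int) (times : Int), Dom_generate_secret_sequences start times → Spec_generate_secret_sequences start times (generate_secret_sequences start times)

-- ===== LEMMAS AND PROOFS =====

-- the k-th secret, price digit, price delta of the common recurrence
def secN (start : Int) : Nat → Int
  | 0 => start
  | k + 1 => compute_secret (secN start k)

def priceN (start : Int) (k : Nat) : Int := PySem.Int.mod (secN start k) 10

def deltaN (start : Int) (k : Nat) : Int := priceN start (k + 1) - priceN start k

def keyN (start : Int) (k : Nat) : String :=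
  PySem.Int.toStr (deltaN start k) ++ "," ++ PySem.Int.toStr (deltaN start (k + 1)) ++ "," ++
  PySem.Int.toStr (deltaN start (k + 2)) ++ "," ++ PySem.Int.toStr (deltaN start (k + 3))

-- dictionary after the first m window insertions (windows start at 0..m-1)
def dictN (start : Int) (m : Nat) : PySem.Dict String Int :=
  (List.range m).foldl
    (fun d k =>
      if (PySem.Dict.get? d (keyN start k)).isNone then
        PySem.Dict.insert d (keyN start k) (priceN start (k + 4))
      else d)
    PySem.Dict.empty

theorem join4 (a b c d : String) :
    PySem.Str.join "," [a, b, c, d] = a ++ "," ++ b ++ "," ++ c ++ "," ++ d := by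
  apply String.toList_injective
  simp [PySem.Str.join, PySem.Chars.join, List.intercalate, List.intersperse]

theorem lemA (start : Int) (n : Nat) :
    (PySem.List.pyRange 0 (n : Int) 1).foldl gssStep
      (start, [PySem.Int.mod start 10], PySem.Dict.empty)
      = (secN start n, (List.range n).map (deltaN start) ++ [priceN start n],
         dictN start (n - 3)) := by
  induction n with
  | zero =>
    simp [PySem.List.pyRange_one_eq_nil (le_refl (0 : Int)), secN, priceN, dictN]
  | succ n ih =>
    have hcast : ((n + 1 : Nat) : Int) = (n : Int) + 1 := by push_cast; ring
    rw [hcast, PySem.List.pyRange_one_succ_right (by positivity), List.foldl_append]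
    rw [ih]
    show gssStep _ (n : Int) = _
    unfold gssStep
    rw [PySem.List.pop?_last]
    dsimp only
    have hsec1 : compute_secret (secN start n) = secN start (n + 1) := rfl
    have hdig : PySem.Int.mod (secN start (n + 1)) 10 = priceN start (n + 1) := rfl
    have hdelta : PySem.Int.mod (compute_secret (secN start n)) 10 - priceN start n
        = deltaN start n := by rw [hsec1, hdig]; rfl
    rw [hdelta]
    have hlist : List.map (deltaN start) (List.range n) ++ [deltaN start n]
        = List.map (deltaN start) (List.range (n + 1)) := by
      rw [List.range_succ, List.map_append]; rfl
    rw [hlist, hsec1, hdig]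
    by_cases h3 : ((n : Int) ≥ 3)
    · rw [if_pos h3]
      have hn3 : 3 ≤ n := by exact_mod_cast h3
      have hb1 : ((n : Int) - 3) = ((n - 3 : Nat) : Int) := by omega
      have hb2 : ((n : Int) + 1) = ((n + 1 : Nat) : Int) := by omega
      rw [hb1, hb2, PySem.List.slice_natCast]
      have h4 : n + 1 - (n - 3) = 4 := by omega
      rw [h4]
      have hslice : (List.take 4 (List.drop (n - 3) (List.map (deltaN start) (List.range (n + 1)))))
          = [deltaN start (n - 3), deltaN start (n - 2), deltaN start (n - 1), deltaN start n] := by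
        apply List.ext_getElem
        · simp; omega
        · intro k hk1 hk2
          have hk4 : k < 4 := by simpa using hk2
          simp only [List.getElem_take, List.getElem_drop, List.getElem_map, List.getElem_range]
          interval_cases k <;>
            simp only [List.getElem_cons_zero, List.getElem_cons_succ] <;>
            first
            | rfl
            | (congr 1; omega)
      rw [hslice]
      have hkey : PySem.Str.join "," (List.map PySem.Int.toStr
          [deltaN start (n - 3), deltaN start (n - 2), deltaN start (n - 1), deltaN start n])
          = keyN start (n - 3) := by
        simp only [List.map_cons, List.map_nil, join4, keyN]
        have e1 : n - 3 + 1 = n - 2 := by omega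
        have e2 : n - 3 + 2 = n - 1 := by omega
        have e3 : n - 3 + 3 = n := by omega
        rw [e1, e2, e3]
      rw [hkey]
      have hd : dictN start (n + 1 - 3)
          = if (PySem.Dict.get? (dictN start (n - 3)) (keyN start (n - 3))).isNone then
              PySem.Dict.insert (dictN start (n - 3)) (keyN start (n - 3)) (priceN start (n + 1))
            else dictN start (n - 3) := by
        have : n + 1 - 3 = (n - 3) + 1 := by omega
        rw [this, dictN, List.range_succ, List.foldl_append, ← dictN]
        have hp : n - 3 + 4 = n + 1 := by omega
        simp [hp]
      rw [hd]
    · rw [if_neg h3]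
      have : n + 1 - 3 = n - 3 := by omega
      rw [this]

theorem lemP (start : Int) (n : Nat) :
    (PySem.List.pyRange 0 (n : Int) 1).foldl
      (fun (st : Int × List Int) _ =>
        let s := step_alt st.1
        (s, st.2 ++ [PySem.Int.mod s 10]))
      (start, [PySem.Int.mod start 10])
      = (secN start n, (List.range (n + 1)).map (priceN start)) := by
  induction n with
  | zero =>
    simp [PySem.List.pyRange_one_eq_nil (le_refl (0 : Int)), secN, priceN]
  | succ n ih =>
    have hcast : ((n + 1 : Nat) : Int) = (n : Int) + 1 := by push_cast; ring
    rw [hcast, PySem.List.pyRange_one_succ_right (by positivity), List.foldl_append]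
    rw [ih]
    simp only [List.foldl_cons, List.foldl_nil]
    have hsec : step_alt (secN start n) = secN start (n + 1) := rfl
    simp [hsec, List.range_succ, priceN]

theorem lemB (start : Int) (n : Nat) :
    generate_secret_sequences_alt start (n : Int) = (dictN start (n - 3)).items := by
  unfold generate_secret_sequences_alt
  rw [lemP]
  have hs : ∀ (l : List Int) (j : Nat), PySem.List.slice l (some (j : Int)) none = l.drop j :=
    fun l j => PySem.List.slice_from_natCast l j
  have h1 : ∀ l : List Int, PySem.List.slice l (some (1 : Int)) none = l.drop 1 := by
    intro l; simpa using hs l 1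
  have h2 : ∀ l : List Int, PySem.List.slice l (some (2 : Int)) none = l.drop 2 := by
    intro l; simpa using hs l 2
  have h3 : ∀ l : List Int, PySem.List.slice l (some (3 : Int)) none = l.drop 3 := by
    intro l; simpa using hs l 3
  have h4 : ∀ l : List Int, PySem.List.slice l (some (4 : Int)) none = l.drop 4 := by
    intro l; simpa using hs l 4
  simp only [h1, h2, h3, h4]
  have hdeltas : ((((List.range (n + 1)).map (priceN start)).zip
        (((List.range (n + 1)).map (priceN start)).drop 1)).map (fun ab => ab.2 - ab.1))
      = (List.range n).map (deltaN start) := by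
    apply List.ext_getElem
    · simp
    · intro k hk1 hk2
      simp only [List.getElem_map, List.getElem_zip, List.getElem_drop, List.getElem_range]
      simp at hk2
      have : 1 + k = k + 1 := by omega
      rw [this]
      rfl
  rw [hdeltas]
  have hwin : (((List.range n).map (deltaN start)).zip
        ((((List.range n).map (deltaN start)).drop 1).zip
          ((((List.range n).map (deltaN start)).drop 2).zip
            (((List.range n).map (deltaN start)).drop 3)))).zip
        ((((List.range (n + 1)).map (priceN start))).drop 4)
      = (List.range (n - 3)).map (fun k =>
          ((deltaN start k, deltaN start (k + 1), deltaN start (k + 2), deltaN start (k + 3)),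
           priceN start (k + 4))) := by
    apply List.ext_getElem
    · simp; omega
    · intro k hk1 hk2
      have hkn : k < n - 3 := by simpa using hk2
      simp only [List.getElem_zip, List.getElem_map, List.getElem_drop, List.getElem_range]
      have e1 : 1 + k = k + 1 := by omega
      have e2 : 2 + k = k + 2 := by omega
      have e3 : 3 + k = k + 3 := by omega
      have e4 : 4 + k = k + 4 := by omega
      rw [e1, e2, e3, e4]
  rw [hwin, List.foldl_map]
  have hpt : ∀ (d : PySem.Dict String Int) (k : Nat),
      insWin d ((deltaN start k, deltaN start (k + 1), deltaN start (k + 2), deltaN start (k + 3)),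
        priceN start (k + 4))
      = (if (PySem.Dict.get? d (keyN start k)).isNone then
          PySem.Dict.insert d (keyN start k) (priceN start (k + 4)) else d) := by
    intro d k
    show (if PySem.Dict.contains d (keyN start k) then d
          else PySem.Dict.insert d (keyN start k) (priceN start (k + 4))) = _
    rcases hg : PySem.Dict.get? d (keyN start k) with _ | v
    · rw [if_neg (by simp [(PySem.Dict.get?_eq_none_iff_contains d _).mp hg])]
      simp
    · have hc : PySem.Dict.contains d (keyN start k) = true := by
        by_contra hcf
        simp [(PySem.Dict.get?_eq_none_iff_contains d (keyN start k)).mpr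
          (Bool.not_eq_true _ ▸ hcf)] at hg
      rw [if_pos hc]
      simp
  rw [PySem.List.foldl_congr_mem _ _ (fun d k =>
      if (PySem.Dict.get? d (keyN start k)).isNone then
        PySem.Dict.insert d (keyN start k) (priceN start (k + 4)) else d) _
      (fun d k _ => hpt d k)]
  rfl

-- ===== VERDICT (by name: the statement is the Claim_ definition above) =====
theorem generate_secret_sequences_spec : Claim_equal_generate_secret_sequences := by
  intro start times _
  unfold Spec_generate_secret_sequences
  by_cases h : 0 ≤ times
  · obtain ⟨n, rfl⟩ : ∃ n : Nat, times = (n : Int) := ⟨times.toNat, (Int.toNat_of_nonneg h).symm⟩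
    rw [generate_secret_sequences, lemA, lemB]
  · have hnil : PySem.List.pyRange 0 times 1 = [] := PySem.List.pyRange_one_eq_nil (by omega)
    have h1 : ∀ x : Int, PySem.List.slice [x] (some (1:Int)) none = [] := by
      intro x; simp [PySem.List.slice, PySem.List.clampIdx]
    have h4 : ∀ x : Int, PySem.List.slice [x] (some (4:Int)) none = [] := by
      intro x; simp [PySem.List.slice, PySem.List.clampIdx]
    simp [generate_secret_sequences, generate_secret_sequences_alt, hnil, h1, h4]
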